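-- pv_equiv track=rewrite | github.com/Ob3y1/USS | model/model.py | detect_hand_between_students
-- ===== SOURCE A (Python) =====
-- def detect_hand_between_students(hands):
--     if len(hands) < 2:
--         return False
--     hands = sorted(hands, key=lambda h: h[0])
--     for i in range(len(hands) - 1):
--         x1, _ = hands[i]
--         x2, _ = hands[i + 1]
--         if abs(x2 - x1) < 150:
--             return True
--     return False
-- ===== SOURCE B (Python) =====
-- def detect_hand_between_students(hands):
--     if len(hands) < 2:
--         return False
--     for i in range(len(hands)):
--         for j in range(i + 1, len(hands)):
--             if abs(hands[i][0] - hands[j][0]) < 150: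
--                 return True
--     return False
-- ===== Notes on version B (the rewrite author's own statement) =====
-- stated objective: simpler
-- what changed: B drops the sort entirely and brute-force checks every pair of hands for x-distance < 150, instead of A's sort-then-scan-adjacent pass.
import Mathlib
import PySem

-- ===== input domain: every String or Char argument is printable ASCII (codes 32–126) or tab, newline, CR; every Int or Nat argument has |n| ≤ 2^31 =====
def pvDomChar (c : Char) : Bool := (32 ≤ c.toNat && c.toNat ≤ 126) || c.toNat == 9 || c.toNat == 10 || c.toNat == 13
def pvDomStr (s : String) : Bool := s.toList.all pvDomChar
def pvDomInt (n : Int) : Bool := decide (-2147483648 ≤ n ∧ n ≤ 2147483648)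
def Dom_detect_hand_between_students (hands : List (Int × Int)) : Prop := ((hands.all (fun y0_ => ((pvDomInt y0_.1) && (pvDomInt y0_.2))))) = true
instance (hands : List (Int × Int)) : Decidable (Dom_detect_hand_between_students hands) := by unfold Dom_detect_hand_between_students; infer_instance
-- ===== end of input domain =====

-- B replaces A's sort-then-adjacent-gap scan by a plain all-pairs check (simpler, no sort; same results).

-- ===== PORT A =====
-- Python's abs() on int, ported explicitly (kernel-friendly; = |n|)
def pvPyAbs (n : Int) : Int := if n < 0 then -n else n

-- the for-loop over i in range(len-1) comparing hands[i] with hands[i+1] on the sorted list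
def pvAdjScan : List (Int × Int) → Bool
  | a :: b :: t => if pvPyAbs (b.1 - a.1) < 150 then true else pvAdjScan (b :: t)
  | _ => false

def detect_hand_between_students (hands : List (Int × Int)) : Bool :=
  if hands.length < 2 then false
  else pvAdjScan (PySem.List.sorted hands (fun h => h.1))

-- ===== PORT B =====
-- outer loop over i: compare hands[i] with every later hand, return True on first close pair
def pvPairScan : List (Int × Int) → Bool
  | [] => false
  | a :: t => if t.any (fun b => pvPyAbs (a.1 - b.1) < 150) then true else pvPairScan t

def detect_hand_between_students_alt (hands : List (Int × Int)) : Bool :=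
  if hands.length < 2 then false
  else pvPairScan hands

-- ===== PRECONDITION & SPEC =====
def Spec_detect_hand_between_students (hands : List (Int × Int)) (out : Bool) : Prop := out = detect_hand_between_students_alt hands
instance (hands : List (Int × Int)) (out : Bool) : Decidable (Spec_detect_hand_between_students hands out) := by unfold Spec_detect_hand_between_students; infer_instance

-- ===== CLAIM (what is proved, stated in full; the proofs are below) =====
def Claim_equal_detect_hand_between_students : Prop := ∀ (hands : List (Int × Int)), Dom_detect_hand_between_students hands → Spec_detect_hand_between_students hands (detect_hand_between_students hands)

-- ===== LEMMAS AND PROOFS =====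

-- "these two hands are at x-distance >= 150"; both scans return false exactly when all pairs are far.
def pvFar (a b : Int × Int) : Prop := 150 ≤ |a.1 - b.1|

theorem pvPyAbs_eq_abs (n : Int) : pvPyAbs n = |n| := by
  unfold pvPyAbs
  split_ifs with h
  · exact (abs_of_neg h).symm
  · exact (abs_of_nonneg (not_lt.mp h)).symm

theorem pvFar_symm : Symmetric pvFar := by
  intro a b h; unfold pvFar at *; rw [abs_sub_comm]; exact h

theorem pvPairScan_false_iff (l : List (Int × Int)) :
    pvPairScan l = false ↔ l.Pairwise pvFar := by
  induction l with
  | nil => simp [pvPairScan]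
  | cons a t ih =>
      rw [pvPairScan]
      by_cases h : ∃ b ∈ t, |a.1 - b.1| < 150
      · obtain ⟨b, hb, hlt⟩ := h
        have hany : t.any (fun b => pvPyAbs (a.1 - b.1) < 150) = true := by
          simp only [List.any_eq_true, decide_eq_true_eq, pvPyAbs_eq_abs]
          exact ⟨b, hb, hlt⟩
        simp only [hany, if_true, List.pairwise_cons]
        constructor
        · intro hfalse; cases hfalse
        · rintro ⟨hall, -⟩
          exact absurd hlt (not_lt.mpr (hall b hb))
      · have hany : t.any (fun b => pvPyAbs (a.1 - b.1) < 150) = false := by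
          simp only [List.any_eq_false, decide_eq_true_eq, pvPyAbs_eq_abs]
          intro b hb hlt
          exact h ⟨b, hb, hlt⟩
        simp only [hany, Bool.false_eq_true, if_false, ih, List.pairwise_cons]
        constructor
        · intro hp
          exact ⟨fun b hb => not_lt.mp (fun hlt => h ⟨b, hb, hlt⟩), hp⟩
        · rintro ⟨-, hp⟩; exact hp

-- on a list sorted by x the adjacent-gap scan already decides "all pairs far"
theorem pvAdjScan_sorted_false_iff (l : List (Int × Int))
    (hs : l.Pairwise (fun a b => a.1 ≤ b.1)) :
    pvAdjScan l = false ↔ l.Pairwise pvFar := by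
  induction l with
  | nil => simp [pvAdjScan]
  | cons a t ih =>
      cases t with
      | nil => simp [pvAdjScan]
      | cons b u =>
          obtain ⟨hale, hst⟩ := List.pairwise_cons.mp hs
          rw [pvAdjScan]
          rw [pvPyAbs_eq_abs]
          by_cases h : |b.1 - a.1| < 150
          · simp only [h, if_true]
            constructor
            · intro hfalse; cases hfalse
            · intro hp
              have hfar : pvFar a b := (List.pairwise_cons.mp hp).1 b List.mem_cons_self
              unfold pvFar at hfar
              rw [abs_sub_comm] at hfar
              exact absurd h (not_lt.mpr hfar)
          · simp only [h, if_false, ih hst, List.pairwise_cons]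
            constructor
            · intro hp
              refine ⟨?_, hp⟩
              intro c hc
              have hab : a.1 ≤ b.1 := hale b List.mem_cons_self
              have hab150 : a.1 + 150 ≤ b.1 := by
                rw [abs_of_nonneg (by omega : (0:Int) ≤ b.1 - a.1)] at h
                omega
              have hbc : b.1 ≤ c.1 := by
                rcases List.mem_cons.mp hc with rfl | hcu
                · exact le_refl _
                · exact (List.pairwise_cons.mp hst).1 c hcu
              have hac : a.1 ≤ c.1 := hale c hc
              unfold pvFar
              rw [abs_of_nonpos (by omega)]
              omega
            · rintro ⟨-, hp⟩; exact hp

-- ===== VERDICT (by name: the statement is the Claim_ definition above) =====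
theorem detect_hand_between_students_spec : Claim_equal_detect_hand_between_students := by
  intro hands _
  unfold Spec_detect_hand_between_students detect_hand_between_students detect_hand_between_students_alt
  split_ifs with h
  · rfl
  · set s := PySem.List.sorted hands (fun h => h.1) with hsdef
    have hperm : s.Perm hands := PySem.List.sorted_perm hands _ _
    have hs : s.Pairwise (fun a b => a.1 ≤ b.1) := PySem.List.sorted_pairwise hands _
    have hiff : pvAdjScan s = false ↔ pvPairScan hands = false := by
      rw [pvAdjScan_sorted_false_iff s hs, pvPairScan_false_iff]
      exact ⟨fun hp => hp.perm hperm (fun hab => pvFar_symm hab), fun hp => hp.perm hperm.symm (fun hab => pvFar_symm hab)⟩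
    rcases h1 : pvAdjScan s with _ | _ <;> rcases h2 : pvPairScan hands with _ | _
    · rfl
    · exact absurd (hiff.mp h1) (by simp [h2])
    · exact absurd (hiff.mpr h2) (by simp [h1])
    · rfl
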